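-- pv_equiv track=rewrite | github.com/dbconfession78/interview_prep | code_wars/0024_base_91_encoding_and_decoding.py | dec_to_ascii
-- ===== SOURCE A (Python) =====
-- def dec_to_ascii(dec):
--     CHAR = [x for x in "ABCDEFGHIJKLMNOPQRSTUVWXYZabcdefghijklmnopqrstuvwxyz0123456789!#$%&()*+,./:;<=>?@[]^_`{|}~\""]
--     # CHAR = [x for x in "ABCDEFGHIJKLMNOPQRSTUVWXYZabcdefghijklmnopqrstuvwxyz0123456789+/\""]
--     # nums = [_ for _ in range(91)]
--
--     # INT = [_ for _ in range(64)]
--     retval = ""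
--     while dec > 91:
--     # while dec > 64:
--         retval += CHAR[dec % 10]
--         dec //= 10
--     retval += CHAR[dec]
--     return retval
-- ===== SOURCE B (Python) =====
-- def _indices(dec):
--     if dec <= 91:
--         return [dec]
--     return [dec % 10] + _indices(dec // 10)
--
--
-- def dec_to_ascii(dec):
--     CHAR = "ABCDEFGHIJKLMNOPQRSTUVWXYZabcdefghijklmnopqrstuvwxyz0123456789!#$%&()*+,./:;<=>?@[]^_`{|}~\""
--     return ''.join(CHAR[i] for i in _indices(dec))
-- ===== Notes on version B (the rewrite author's own statement) =====
-- stated objective: alternative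
-- what changed: Splits the task into two stages: a recursion that produces the list of table indices (dec % 10 digits, then the final value), and a separate map-and-join of those indices through CHAR, instead of A's single while-loop mutating a string accumulator.
import Mathlib
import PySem

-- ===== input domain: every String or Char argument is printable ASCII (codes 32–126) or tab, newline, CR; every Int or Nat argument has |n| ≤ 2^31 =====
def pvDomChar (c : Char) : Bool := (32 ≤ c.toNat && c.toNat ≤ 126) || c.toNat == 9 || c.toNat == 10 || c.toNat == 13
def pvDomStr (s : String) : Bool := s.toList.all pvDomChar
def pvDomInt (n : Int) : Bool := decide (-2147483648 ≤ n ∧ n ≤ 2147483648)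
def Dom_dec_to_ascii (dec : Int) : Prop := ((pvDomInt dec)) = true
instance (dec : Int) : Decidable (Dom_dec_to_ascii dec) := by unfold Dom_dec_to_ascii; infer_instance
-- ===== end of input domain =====

-- B splits A's while-loop into two stages: a recursion yielding the list of table indices, then a map-and-join through CHAR; same cost, different decomposition.
-- Both Pythons raise IndexError on the same inputs; Pre_ excludes exactly those (no value exists there).

-- ===== PORT A =====
-- CHAR = [x for x in "…"]  (a list of the 91 characters)
def decToAsciiChars : List Char :=
  "ABCDEFGHIJKLMNOPQRSTUVWXYZabcdefghijklmnopqrstuvwxyz0123456789!#$%&()*+,./:;<=>?@[]^_`{|}~\"".toList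

-- the while-loop: retval accumulates CHAR[dec % 10]; afterwards CHAR[dec] is appended.
-- (.getD '?' keeps the port total; Pre_ excludes the inputs where Python's CHAR[…] raises IndexError)
def dec_to_ascii_loop (dec : Int) (retval : String) : String :=
  if 91 < dec then
    dec_to_ascii_loop (PySem.Int.floordiv dec 10)
      (retval ++ ((PySem.List.pyGet? decToAsciiChars (PySem.Int.mod dec 10)).getD '?').toString)
  else
    retval ++ ((PySem.List.pyGet? decToAsciiChars dec).getD '?').toString
termination_by dec.toNat
decreasing_by
  have h10 : PySem.Int.floordiv dec 10 = dec / 10 := PySem.Int.floordiv_eq_ediv_of_pos (by omega)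
  have h1 := Int.ediv_add_emod dec 10
  have h2 := Int.emod_nonneg dec (by norm_num : (10:Int) ≠ 0)
  have h3 := Int.emod_lt_of_pos dec (by norm_num : (0:Int) < 10)
  rw [h10]; omega

def dec_to_ascii (dec : Int) : String := dec_to_ascii_loop dec ""

-- ===== PORT B =====
-- _indices: the list of table indices, least-significant digit first, ending with the residual value
def decToAsciiIndices (dec : Int) : List Int :=
  if dec ≤ 91 then [dec]
  else (PySem.Int.mod dec 10) :: decToAsciiIndices (PySem.Int.floordiv dec 10)
termination_by dec.toNat
decreasing_by
  have h10 : PySem.Int.floordiv dec 10 = dec / 10 := PySem.Int.floordiv_eq_ediv_of_pos (by omega)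
  have h1 := Int.ediv_add_emod dec 10
  have h2 := Int.emod_nonneg dec (by norm_num : (10:Int) ≠ 0)
  have h3 := Int.emod_lt_of_pos dec (by norm_num : (0:Int) < 10)
  rw [h10]; omega

-- CHAR is the string itself; ''.join(CHAR[i] for i in _indices(dec))
def decToAsciiCHAR : String :=
  "ABCDEFGHIJKLMNOPQRSTUVWXYZabcdefghijklmnopqrstuvwxyz0123456789!#$%&()*+,./:;<=>?@[]^_`{|}~\""

def dec_to_ascii_alt (dec : Int) : String :=
  String.ofList ((decToAsciiIndices dec).map fun i => (PySem.Str.pyGet? decToAsciiCHAR i).getD '?')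

-- ===== PRECONDITION & SPEC =====
-- Pre_ excludes exactly the inputs where Python A raises IndexError: dec < -91, or the
-- value the loop ends on is exactly 91 (i.e. dec = 91 or dec's decimal expansion starts "91…").
def Pre_dec_to_ascii (dec : Int) : Prop :=
  -91 ≤ dec ∧ ∀ k ∈ Finset.range 10, ¬ (91 * 10 ^ k ≤ dec ∧ dec < 92 * 10 ^ k)
instance (dec : Int) : Decidable (Pre_dec_to_ascii dec) := by unfold Pre_dec_to_ascii; infer_instance

def pvWitness_dec_to_ascii : Int := (12345)

def Spec_dec_to_ascii (dec : Int) (out : String) : Prop := out = dec_to_ascii_alt dec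
instance (dec : Int) (out : String) : Decidable (Spec_dec_to_ascii dec out) := by unfold Spec_dec_to_ascii; infer_instance

-- ===== CLAIM (what is proved, stated in full; the proofs are below) =====
def Claim_equal_dec_to_ascii : Prop := ∀ (dec : Int), Dom_dec_to_ascii dec → Pre_dec_to_ascii dec → Spec_dec_to_ascii dec (dec_to_ascii dec)

-- ===== LEMMAS AND PROOFS =====
theorem strGet_eq_listGet (i : Int) :
    (PySem.Str.pyGet? decToAsciiCHAR i).getD '?' = (PySem.List.pyGet? decToAsciiChars i).getD '?' := rfl

theorem ofList_cons (c : Char) (l : List Char) :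
    String.ofList (c :: l) = c.toString ++ String.ofList l := by
  apply String.toList_injective; simp

theorem loop_eq_alt (dec : Int) (retval : String) :
    dec_to_ascii_loop dec retval = retval ++ dec_to_ascii_alt dec := by
  rw [dec_to_ascii_loop]
  unfold dec_to_ascii_alt
  rw [decToAsciiIndices]
  by_cases h : 91 < dec
  · rw [if_pos h, if_neg (by omega), loop_eq_alt (PySem.Int.floordiv dec 10) _]
    simp only [List.map_cons, strGet_eq_listGet, ofList_cons]
    rw [String.append_assoc]
    simp only [dec_to_ascii_alt, strGet_eq_listGet]
  · rw [if_neg h, if_pos (by omega)]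
    simp only [List.map_cons, List.map_nil, strGet_eq_listGet, ofList_cons]
    apply String.toList_injective; simp
termination_by dec.toNat
decreasing_by
  have h10 : PySem.Int.floordiv dec 10 = dec / 10 := PySem.Int.floordiv_eq_ediv_of_pos (by omega)
  have h1 := Int.ediv_add_emod dec 10
  have h2 := Int.emod_nonneg dec (by norm_num : (10:Int) ≠ 0)
  have h3 := Int.emod_lt_of_pos dec (by norm_num : (0:Int) < 10)
  rw [h10]; omega

-- ===== VERDICT (by name: the statement is the Claim_ definition above) =====
theorem dec_to_ascii_spec : Claim_equal_dec_to_ascii := by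
  intro dec _ _
  show dec_to_ascii dec = dec_to_ascii_alt dec
  rw [dec_to_ascii, loop_eq_alt]
  simp
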